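-- pv_equiv track=rewrite | github.com/bmlsj/Solve-algorithms | PGS/n^2 배열 자르기.py | solution
-- ===== SOURCE A (Python) =====
-- def solution(n, left, right):
--
--     ans = []
--     for i in range((right - left) + 1):
--         idx = left + i
--         row = idx // n
--         col = idx % n
--
--         ans.append(max(col, row) + 1)
--
--     return ans
-- ===== SOURCE B (Python) =====
-- def solution(n, left, right):
--     # Row-by-row: each touched row contributes a constant block (r+1) for the
--     # lower-triangle columns and an arithmetic run c+1 for the rest.
--     r0, r1 = left // n, right // n
--     out = []
--     for r in range(r0, r1 + 1):
--         s = left % n if r == r0 else 0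
--         e = right % n if r == r1 else n - 1
--         out.extend([r + 1] * (min(e, r) - s + 1))
--         for c in range(max(s, r + 1), e + 1):
--             out.append(c + 1)
--     return out
-- ===== Notes on version B (the rewrite author's own statement) =====
-- stated objective: alternative
-- what changed: B replaces A's per-index loop (one floordiv and one mod per element of the slice) by a per-row decomposition: two divmods per touched row, the constant lower-triangle block (r+1) emitted by list replication and the ascending tail c+1 from a range, row segments concatenated.
-- outside the precondition, e.g. on solution(0, 0, 1): A raises ZeroDivisionError, B raises ZeroDivisionError; on solution(-2, 0, 1): A returns [1, 0], B returns []
import Mathlib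
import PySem

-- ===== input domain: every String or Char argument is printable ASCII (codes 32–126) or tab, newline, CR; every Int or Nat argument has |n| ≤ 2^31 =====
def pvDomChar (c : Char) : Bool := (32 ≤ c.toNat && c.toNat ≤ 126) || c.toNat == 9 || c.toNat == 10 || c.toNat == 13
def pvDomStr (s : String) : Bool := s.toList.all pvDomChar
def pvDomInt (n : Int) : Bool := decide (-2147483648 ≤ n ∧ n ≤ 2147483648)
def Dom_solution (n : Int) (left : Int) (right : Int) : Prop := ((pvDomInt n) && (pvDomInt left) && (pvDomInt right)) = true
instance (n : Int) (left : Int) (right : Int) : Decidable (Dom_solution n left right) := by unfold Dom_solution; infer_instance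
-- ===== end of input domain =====

-- B replaces the per-index loop by a per-row decomposition (constant block + arithmetic run); equivalence of the return values is proved for n > 0.

-- ===== PORT A =====
def solution (n : Int) (left : Int) (right : Int) : List Int :=
  (PySem.List.pyRange 0 ((right - left) + 1) 1).foldl (fun ans i =>
    let idx := left + i
    let row := PySem.Int.floordiv idx n
    let col := PySem.Int.mod idx n
    ans ++ [max col row + 1]) []

-- ===== PORT B =====
def solution_alt (n : Int) (left : Int) (right : Int) : List Int :=
  let r0 := PySem.Int.floordiv left n
  let r1 := PySem.Int.floordiv right n
  (PySem.List.pyRange r0 (r1 + 1) 1).foldl (fun out r =>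
    let s := if r = r0 then PySem.Int.mod left n else 0
    let e := if r = r1 then PySem.Int.mod right n else n - 1
    let out := out ++ List.replicate (min e r - s + 1).toNat (r + 1)
    (PySem.List.pyRange (max s (r + 1)) (e + 1) 1).foldl (fun out c => out ++ [c + 1]) out) []

-- ===== PRECONDITION & SPEC =====
-- Pre_ excludes n ≤ 0: on n = 0 the Python A raises ZeroDivisionError, and n < 0 is
-- outside the natural domain of the task (n is the side length of an n×n array).
def Pre_solution (n : Int) (left : Int) (right : Int) : Prop := 0 < n
instance (n : Int) (left : Int) (right : Int) : Decidable (Pre_solution n left right) := by unfold Pre_solution; infer_instance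
def pvWitness_solution : Int × Int × Int := (3, 2, 7)

def Spec_solution (n : Int) (left : Int) (right : Int) (out : List Int) : Prop := out = solution_alt n left right
instance (n : Int) (left : Int) (right : Int) (out : List Int) : Decidable (Spec_solution n left right out) := by unfold Spec_solution; infer_instance

-- ===== CLAIM (what is proved, stated in full; the proofs are below) =====
def Claim_equal_solution : Prop := ∀ (n : Int) (left : Int) (right : Int), Dom_solution n left right → Pre_solution n left right → Spec_solution n left right (solution n left right)

-- ===== LEMMAS AND PROOFS =====

-- the per-index value both programs are about
def gVal (n idx : Int) : Int := max (PySem.Int.mod idx n) (PySem.Int.floordiv idx n) + 1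

-- B's contribution of one row
def segB (n left right rr : Int) : List Int :=
  List.replicate
      (min (if rr = PySem.Int.floordiv right n then PySem.Int.mod right n else n - 1) rr -
        (if rr = PySem.Int.floordiv left n then PySem.Int.mod left n else 0) + 1).toNat (rr + 1) ++
    (PySem.List.pyRange
      (max (if rr = PySem.Int.floordiv left n then PySem.Int.mod left n else 0) (rr + 1))
      ((if rr = PySem.Int.floordiv right n then PySem.Int.mod right n else n - 1) + 1) 1).map
      (fun c => c + 1)

lemma alt_eq_flatMap (n left right : Int) :
    solution_alt n left right =
      (PySem.List.pyRange (PySem.Int.floordiv left n) (PySem.Int.floordiv right n + 1) 1).flatMap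
        (segB n left right) := by
  simp only [solution_alt, PySem.List.foldl_append_singleton_eq_map,
    List.append_assoc]
  rw [PySem.List.foldl_append_eq_flatMap]
  rfl

-- one row of values, on the column side
lemma row_cols (r : Int) : ∀ (k : Nat) (s e : Int), (e + 1 - s).toNat = k →
    (PySem.List.pyRange s (e + 1) 1).map (fun c => max c r + 1) =
      List.replicate (min e r - s + 1).toNat (r + 1) ++
        (PySem.List.pyRange (max s (r + 1)) (e + 1) 1).map (fun c => c + 1) := by
  intro k
  induction k with
  | zero =>
    intro s e hk
    have hse : e + 1 ≤ s := by omega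
    rw [PySem.List.pyRange_one_eq_nil hse,
        PySem.List.pyRange_one_eq_nil (show e + 1 ≤ max s (r + 1) by omega)]
    have : (min e r - s + 1).toNat = 0 := by omega
    simp [this]
  | succ k ih =>
    intro s e hk
    have hse : s ≤ e := by omega
    rw [PySem.List.pyRange_one_cons (show s < e + 1 by omega)]
    by_cases hsr : s ≤ r
    · have h1 : (min e r - s + 1).toNat = ((min e r - (s + 1) + 1).toNat) + 1 := by omega
      have h2 : max s (r + 1) = max (s + 1) (r + 1) := by omega
      have h3 : max s r + 1 = r + 1 := by omega
      rw [List.map_cons, h3, h1, List.replicate_succ, h2, List.cons_append]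
      rw [ih (s + 1) e (by omega)]
    · have h1 : (min e r - s + 1).toNat = 0 := by omega
      have h2 : max s (r + 1) = s := by omega
      have h12 : (min e r - (s + 1) + 1).toNat = 0 := by omega
      have h22 : max (s + 1) (r + 1) = s + 1 := by omega
      have h3 : max s r + 1 = s + 1 := by omega
      rw [List.map_cons, h3, h1, h2, List.replicate_zero, List.nil_append,
          PySem.List.pyRange_one_cons (show s < e + 1 by omega), List.map_cons]
      have := ih (s + 1) e (by omega)
      rw [h12, h22] at this
      simp only [List.replicate_zero, List.nil_append] at this
      rw [this]

-- inside row r, the flattened value is max col r + 1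
lemma row_shift (n : Int) (hn : 0 < n) (r s e : Int) (hs : 0 ≤ s) (he : e < n) :
    (PySem.List.pyRange (r * n + s) (r * n + e + 1) 1).map (gVal n) =
      (PySem.List.pyRange s (e + 1) 1).map (fun c => max c r + 1) := by
  rw [PySem.List.pyRange_one (r * n + s), PySem.List.pyRange_one s,
      List.map_map, List.map_map]
  have hlen : (r * n + e + 1 - (r * n + s)).toNat = (e + 1 - s).toNat := by omega
  rw [hlen]
  apply List.map_congr_left
  intro k hk
  rw [List.mem_range] at hk
  have hck : (k : Int) < e + 1 - s := by omega
  simp only [Function.comp_apply, gVal]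
  have hfd : PySem.Int.floordiv (r * n + s + k) n = r := by
    rw [PySem.Int.floordiv_eq_iff_of_pos hn]
    constructor
    · nlinarith [Int.natCast_nonneg k]
    · nlinarith [Int.natCast_nonneg k]
  have hmod : PySem.Int.mod (r * n + s + k) n = s + k := by
    have := PySem.Int.floordiv_mul_add_mod (r * n + s + k) n
    rw [hfd] at this
    omega
  rw [hfd, hmod]

-- one full row, combined
lemma row_full (n : Int) (hn : 0 < n) (r s e : Int) (hs : 0 ≤ s) (he : e < n) :
    (PySem.List.pyRange (r * n + s) (r * n + e + 1) 1).map (gVal n) =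
      List.replicate (min e r - s + 1).toNat (r + 1) ++
        (PySem.List.pyRange (max s (r + 1)) (e + 1) 1).map (fun c => c + 1) := by
  rw [row_shift n hn r s e hs he, row_cols r (e + 1 - s).toNat s e rfl]

lemma rows_main (n : Int) (hn : 0 < n) : ∀ (k : Nat) (l r : Int),
    (PySem.Int.floordiv r n - PySem.Int.floordiv l n).toNat ≤ k →
    (PySem.List.pyRange (PySem.Int.floordiv l n) (PySem.Int.floordiv r n + 1) 1).flatMap
        (segB n l r) =
      (PySem.List.pyRange l (r + 1) 1).map (gVal n) := by
  intro k
  induction k with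
  | zero =>
    intro l r hk
    have hml := PySem.Int.floordiv_mul_add_mod l n
    have hmr := PySem.Int.floordiv_mul_add_mod r n
    have hml0 := PySem.Int.mod_nonneg l hn
    have hmln := PySem.Int.mod_lt l hn
    have hmr0 := PySem.Int.mod_nonneg r hn
    have hmrn := PySem.Int.mod_lt r hn
    rcases lt_or_ge (PySem.Int.floordiv r n) (PySem.Int.floordiv l n) with hlt | hge
    · -- empty slice: r < l
      have hmul : (PySem.Int.floordiv r n + 1) * n ≤ PySem.Int.floordiv l n * n :=
        mul_le_mul_of_nonneg_right (by omega) (le_of_lt hn)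
      have hrl : r + 1 ≤ l := by nlinarith
      rw [PySem.List.pyRange_one_eq_nil (by omega), PySem.List.pyRange_one_eq_nil hrl]
      simp
    · -- single row
      have heq : PySem.Int.floordiv r n = PySem.Int.floordiv l n := by omega
      rw [heq]
      rw [PySem.List.pyRange_one_cons (show PySem.Int.floordiv l n < PySem.Int.floordiv l n + 1 by omega),
          PySem.List.pyRange_one_eq_nil (le_refl _)]
      simp only [List.flatMap_cons, List.flatMap_nil, List.append_nil]
      unfold segB
      rw [heq]
      rw [if_pos rfl, if_pos rfl]
      have h1 : l = PySem.Int.floordiv l n * n + PySem.Int.mod l n := by omega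
      have h2 : r = PySem.Int.floordiv l n * n + PySem.Int.mod r n := by
        rw [heq] at hmr; omega
      rw [← row_full n hn (PySem.Int.floordiv l n) (PySem.Int.mod l n) (PySem.Int.mod r n)
            hml0 hmrn]
      rw [← h1, ← h2]
  | succ k ih =>
    intro l r hk
    have hml := PySem.Int.floordiv_mul_add_mod l n
    have hmr := PySem.Int.floordiv_mul_add_mod r n
    have hml0 := PySem.Int.mod_nonneg l hn
    have hmln := PySem.Int.mod_lt l hn
    have hmr0 := PySem.Int.mod_nonneg r hn
    have hmrn := PySem.Int.mod_lt r hn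
    rcases lt_or_ge (PySem.Int.floordiv l n) (PySem.Int.floordiv r n) with hlt | hge
    · set r0 := PySem.Int.floordiv l n with hr0
      set r1 := PySem.Int.floordiv r n with hr1
      set l' := (r0 + 1) * n with hl'
      have hfd' : PySem.Int.floordiv l' n = r0 + 1 := by
        rw [PySem.Int.floordiv_eq_iff_of_pos hn]
        constructor
        · exact le_refl _
        · nlinarith
      have hmd' : PySem.Int.mod l' n = 0 := by
        have := PySem.Int.floordiv_mul_add_mod l' n
        rw [hfd'] at this; omega
      rw [PySem.List.pyRange_one_cons (show r0 < r1 + 1 by omega), List.flatMap_cons]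
      -- head row
      have hhead : segB n l r r0 =
          (PySem.List.pyRange l l' 1).map (gVal n) := by
        unfold segB
        rw [if_pos rfl, if_neg (by omega)]
        have h1 : l = r0 * n + PySem.Int.mod l n := by omega
        have := row_full n hn r0 (PySem.Int.mod l n) (n - 1) hml0 (by omega)
        rw [show r0 * n + (n - 1) + 1 = (r0 + 1) * n by ring, ← h1] at this
        exact this.symm
      -- tail rows: segB for l agrees with segB for l' on rows > r0
      have htail : (PySem.List.pyRange (r0 + 1) (r1 + 1) 1).flatMap (segB n l r) =
          (PySem.List.pyRange (r0 + 1) (r1 + 1) 1).flatMap (segB n l' r) := by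
        apply List.flatMap_congr
        intro rr hrr
        rw [PySem.List.mem_pyRange_one] at hrr
        unfold segB
        rw [if_neg (show ¬ rr = r0 by omega), hfd', hmd']
        by_cases h : rr = r0 + 1
        · rw [if_pos h]
        · rw [if_neg h]
      have hih := ih l' r (by rw [hfd']; omega)
      rw [hfd'] at hih
      rw [htail, hih, hhead, ← List.map_append]
      have hll' : l ≤ l' := by nlinarith
      have hl'r : l' ≤ r + 1 := by
        have : (r0 + 1) * n ≤ r1 * n := mul_le_mul_of_nonneg_right (by omega) (le_of_lt hn)
        omega
      rw [← PySem.List.pyRange_one_append l l' (r + 1) hll' hl'r]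
    · -- at most one row: same as the base case
      rcases lt_or_ge (PySem.Int.floordiv r n) (PySem.Int.floordiv l n) with hlt2 | _
      · have hmul : (PySem.Int.floordiv r n + 1) * n ≤ PySem.Int.floordiv l n * n :=
          mul_le_mul_of_nonneg_right (by omega) (le_of_lt hn)
        have hrl : r + 1 ≤ l := by nlinarith
        rw [PySem.List.pyRange_one_eq_nil (by omega), PySem.List.pyRange_one_eq_nil hrl]
        simp
      · have heq : PySem.Int.floordiv r n = PySem.Int.floordiv l n := by omega
        rw [heq]
        rw [PySem.List.pyRange_one_cons (show PySem.Int.floordiv l n < PySem.Int.floordiv l n + 1 by omega),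
            PySem.List.pyRange_one_eq_nil (le_refl _)]
        simp only [List.flatMap_cons, List.flatMap_nil, List.append_nil]
        unfold segB
        rw [heq]
        rw [if_pos rfl, if_pos rfl]
        have h1 : l = PySem.Int.floordiv l n * n + PySem.Int.mod l n := by omega
        have h2 : r = PySem.Int.floordiv l n * n + PySem.Int.mod r n := by
          rw [heq] at hmr; omega
        rw [← row_full n hn (PySem.Int.floordiv l n) (PySem.Int.mod l n) (PySem.Int.mod r n)
              hml0 hmrn]
        rw [← h1, ← h2]

lemma a_eq_map (n l r : Int) :
    solution n l r = (PySem.List.pyRange l (r + 1) 1).map (gVal n) := by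
  simp only [solution]
  rw [PySem.List.foldl_append_singleton_eq_map
    (fun i => max (PySem.Int.mod (l + i) n) (PySem.Int.floordiv (l + i) n) + 1)]
  rw [List.nil_append, PySem.List.pyRange_one 0, PySem.List.pyRange_one l,
      List.map_map, List.map_map]
  have : (r - l + 1 - 0).toNat = (r + 1 - l).toNat := by omega
  rw [this]
  apply List.map_congr_left
  intro k _
  simp [gVal]

-- ===== VERDICT (by name: the statement is the Claim_ definition above) =====
theorem solution_spec : Claim_equal_solution := by
  intro n l r _ hpre
  unfold Spec_solution
  rw [a_eq_map n l r, alt_eq_flatMap n l r,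
      rows_main n hpre (PySem.Int.floordiv r n - PySem.Int.floordiv l n).toNat l r (le_refl _)]
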